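-- pv_equiv track=rewrite | github.com/PangeAI/SCINS | playground.py | _get_num_bridge_bonds
-- ===== SOURCE A (Python) =====
-- def _get_num_bridge_bonds(ring_list):
--     # can combine with one of the other ring iterators
--     num_bridge_bonds = 0
--     for i in range(len(ring_list)):
--         for j in range(i + 1, len(ring_list)):
--             ring1_atoms = set(ring_list[i])
--             ring2_atoms = set(ring_list[j])
--             common_atoms = ring1_atoms.intersection(ring2_atoms)
--             if len(common_atoms) > 2:
--                 num_bridge_bonds += len(common_atoms) - 1
--     return num_bridge_bonds
-- ===== SOURCE B (Python) =====
-- def _get_num_bridge_bonds(ring_list):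
--     # sort-and-merge: dedup each ring once into a sorted list, then count each
--     # pairwise intersection with a two-pointer merge instead of hash-set ops
--     sorted_rings = [sorted(set(r)) for r in ring_list]
--     total = 0
--     for i, r1 in enumerate(sorted_rings):
--         for r2 in sorted_rings[i + 1:]:
--             c = 0
--             p = 0
--             q = 0
--             while p < len(r1) and q < len(r2):
--                 if r1[p] == r2[q]:
--                     c += 1
--                     p += 1
--                     q += 1
--                 elif r1[p] < r2[q]:
--                     p += 1
--                 else:
--                     q += 1
--             if c > 2:
--                 total += c - 1
--     return total
-- ===== Notes on version B (the rewrite author's own statement) =====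
-- stated objective: alternative
-- what changed: Each ring is deduplicated and sorted once up front, and every pairwise overlap is counted by a two-pointer merge of the two sorted atom lists instead of building hash sets and intersecting them inside the inner pair loop.
import Mathlib
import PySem

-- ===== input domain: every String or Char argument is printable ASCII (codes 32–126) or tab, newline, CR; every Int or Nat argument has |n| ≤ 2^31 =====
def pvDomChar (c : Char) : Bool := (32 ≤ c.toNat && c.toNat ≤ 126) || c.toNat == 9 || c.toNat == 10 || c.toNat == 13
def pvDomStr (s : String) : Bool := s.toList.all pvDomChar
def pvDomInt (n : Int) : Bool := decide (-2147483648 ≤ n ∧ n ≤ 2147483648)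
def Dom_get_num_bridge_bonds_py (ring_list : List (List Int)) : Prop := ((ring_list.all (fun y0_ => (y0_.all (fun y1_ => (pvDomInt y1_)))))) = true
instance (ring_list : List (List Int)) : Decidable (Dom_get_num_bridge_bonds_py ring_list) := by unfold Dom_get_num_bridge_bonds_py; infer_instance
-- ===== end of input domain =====

-- B dedups each ring once into a sorted list and counts each pairwise intersection
-- with a two-pointer merge instead of per-pair hash-set intersections (alternative).

-- ===== PORT A =====
def get_num_bridge_bonds_py (ring_list : List (List Int)) : Int :=
  (PySem.List.pyRange 0 (PySem.List.len ring_list) 1).foldl (fun num_bridge_bonds i =>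
    (PySem.List.pyRange (i + 1) (PySem.List.len ring_list) 1).foldl (fun num_bridge_bonds j =>
      let ring1_atoms := PySem.Set.ofList (PySem.List.pyGetD ring_list i [])
      let ring2_atoms := PySem.Set.ofList (PySem.List.pyGetD ring_list j [])
      let common_atoms := PySem.Set.inter ring1_atoms ring2_atoms
      if PySem.Set.len common_atoms > 2 then
        num_bridge_bonds + (PySem.Set.len common_atoms - 1)
      else
        num_bridge_bonds) num_bridge_bonds) 0

-- ===== PORT B =====
-- the two-pointer while loop of Source B: the pointers p, q become the unscanned suffixes
def mergeCount : List Int → List Int → Int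
  | [], _ => 0
  | _ :: _, [] => 0
  | a :: as, b :: bs =>
    if a = b then 1 + mergeCount as bs
    else if a < b then mergeCount as (b :: bs)
    else mergeCount (a :: as) bs
termination_by a b => a.length + b.length

def get_num_bridge_bonds_py_alt (ring_list : List (List Int)) : Int :=
  let sorted_rings := ring_list.map (fun r => PySem.List.sorted (PySem.Set.ofList r) (fun x => x) false)
  (PySem.List.enumerate sorted_rings 0).foldl (fun total ir1 =>
    (PySem.List.slice sorted_rings (some (ir1.1 + 1)) none).foldl (fun total r2 =>
      let c := mergeCount ir1.2 r2
      if c > 2 then total + (c - 1) else total) total) 0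

-- ===== PRECONDITION & SPEC =====
def Spec_get_num_bridge_bonds_py (ring_list : List (List Int)) (out : Int) : Prop := out = get_num_bridge_bonds_py_alt ring_list
instance (ring_list : List (List Int)) (out : Int) : Decidable (Spec_get_num_bridge_bonds_py ring_list out) := by unfold Spec_get_num_bridge_bonds_py; infer_instance

-- ===== CLAIM (what is proved, stated in full; the proofs are below) =====
def Claim_equal_get_num_bridge_bonds_py : Prop := ∀ (ring_list : List (List Int)), Dom_get_num_bridge_bonds_py ring_list → Spec_get_num_bridge_bonds_py ring_list (get_num_bridge_bonds_py ring_list)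

-- ===== LEMMAS AND PROOFS =====

-- common reference shape: fold over all ordered pairs (r1 before r2), A's step function
def pairStepA (acc : Int) (r1 r2 : List Int) : Int :=
  let c := PySem.Set.len (PySem.Set.inter (PySem.Set.ofList r1) (PySem.Set.ofList r2))
  if c > 2 then acc + (c - 1) else acc

def pairFold (L : List (List Int)) (acc : Int) : Int :=
  match L with
  | [] => acc
  | r :: rs => pairFold rs (rs.foldl (fun t r2 => pairStepA t r r2) acc)

-- B's step function over the presorted dedup lists
def stepB (t : Int) (r1 r2 : List Int) : Int :=
  let c := mergeCount r1 r2
  if c > 2 then t + (c - 1) else t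

def pairFoldB (L : List (List Int)) (acc : Int) : Int :=
  match L with
  | [] => acc
  | r :: rs => pairFoldB rs (rs.foldl (fun t r2 => stepB t r r2) acc)

-- merge-count of two strictly increasing lists is the size of their intersection
theorem mergeCount_eq (a b : List Int) (ha : a.Pairwise (· < ·)) (hb : b.Pairwise (· < ·)) :
    mergeCount a b = ((a.filter (fun x => x ∈ b)).length : Int) := by
  induction a generalizing b with
  | nil => simp [mergeCount]
  | cons x as iha =>
    induction b with
    | nil => simp [mergeCount]
    | cons y bs ihb =>
      have hxas := (List.pairwise_cons.mp ha).1
      have has := (List.pairwise_cons.mp ha).2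
      have hybs := (List.pairwise_cons.mp hb).1
      have hbs := (List.pairwise_cons.mp hb).2
      rw [mergeCount]
      by_cases hxy : x = y
      · subst hxy
        rw [if_pos rfl, iha bs has hbs]
        have h1 : as.filter (fun z => decide (z ∈ x :: bs)) = as.filter (fun z => decide (z ∈ bs)) := by
          apply List.filter_congr
          intro z hz
          have hgt := hxas z hz
          simp only [List.mem_cons, decide_eq_decide]
          constructor
          · rintro (h | h); · omega
            · exact h
          · exact Or.inr
        rw [List.filter_cons_of_pos (by simp), h1]
        simp [List.length_cons]; omega
      · rw [if_neg hxy]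
        by_cases hlt : x < y
        · rw [if_pos hlt, iha (y :: bs) has hb]
          have hx : ¬ (x ∈ y :: bs) := by
            intro h
            rcases List.mem_cons.mp h with h | h
            · exact hxy h
            · have := hybs x h; omega
          rw [List.filter_cons_of_neg (by simpa using hx)]
        · rw [if_neg hlt, ihb hbs]
          have key : ∀ z ∈ x :: as, (decide (z ∈ y :: bs)) = (decide (z ∈ bs)) := by
            intro z hz
            have hzy : y < z := by
              rcases List.mem_cons.mp hz with h | h
              · subst h; omega
              · have := hxas z h; omega
            simp only [List.mem_cons, decide_eq_decide]
            constructor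
            · rintro (h | h); · omega
              · exact h
            · exact Or.inr
          rw [List.filter_congr key]

-- the merge count over the two sorted dedup lists is A's intersection size
theorem inter_len (r1 r2 : List Int) :
    mergeCount (PySem.List.sorted (PySem.Set.ofList r1) (fun x => x) false)
        (PySem.List.sorted (PySem.Set.ofList r2) (fun x => x) false)
      = PySem.Set.len (PySem.Set.inter (PySem.Set.ofList r1) (PySem.Set.ofList r2)) := by
  rw [mergeCount_eq _ _ (PySem.List.sorted_ofList_pairwise_lt r1) (PySem.List.sorted_ofList_pairwise_lt r2)]
  have h1 : (PySem.List.sorted (PySem.Set.ofList r1) (fun x => x) false).filter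
        (fun x => decide (x ∈ PySem.List.sorted (PySem.Set.ofList r2) (fun x => x) false))
      = (PySem.List.sorted (PySem.Set.ofList r1) (fun x => x) false).filter
        (fun x => (PySem.Set.ofList r2).contains x) := by
    apply List.filter_congr
    intro z _
    simp [PySem.List.mem_sorted]
  rw [h1]
  have h2 : ((PySem.List.sorted (PySem.Set.ofList r1) (fun x => x) false).filter
        (fun x => (PySem.Set.ofList r2).contains x)).Perm
      ((PySem.Set.ofList r1).filter (fun x => (PySem.Set.ofList r2).contains x)) :=
    (PySem.List.sorted_perm _ _ _).filter _
  rw [h2.length_eq]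
  simp [PySem.Set.len, PySem.Set.inter]

-- A's double index loop is the pair fold
theorem foldA (L : List (List Int)) :
    ∀ (k i : Nat) (acc : Int), L.length ≤ i + k →
    (PySem.List.pyRange (i : Int) (PySem.List.len L) 1).foldl
      (fun num i =>
        (PySem.List.pyRange (i + 1) (PySem.List.len L) 1).foldl
          (fun num j => pairStepA num (PySem.List.pyGetD L i []) (PySem.List.pyGetD L j [])) num) acc
    = pairFold (L.drop i) acc := by
  intro k
  induction k with
  | zero =>
    intro i acc h
    rw [PySem.List.pyRange_one_eq_nil (by simp [PySem.List.len]; omega)]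
    rw [List.drop_of_length_le (by omega)]
    simp [pairFold]
  | succ k ih =>
    intro i acc h
    by_cases hi : i < L.length
    · rw [PySem.List.pyRange_one_cons (by simp [PySem.List.len]; omega)]
      rw [List.foldl_cons]
      have hcast : (i : Int) + 1 = ((i + 1 : Nat) : Int) := by push_cast; ring
      rw [hcast, ih (i + 1) _ (by omega)]
      rw [List.drop_eq_getElem_cons hi, pairFold]
      congr 1
      rw [PySem.List.foldl_pyRange_pyGetD L [] _ acc (by positivity)]
      rw [PySem.List.pyGetD_natCast]
      rw [Int.toNat_natCast]
      congr 1
      simp [List.getD, hi]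
    · rw [PySem.List.pyRange_one_eq_nil (by simp [PySem.List.len]; omega)]
      rw [List.drop_of_length_le (by omega)]
      simp [pairFold]

theorem portA_eq (L : List (List Int)) : get_num_bridge_bonds_py L = pairFold L 0 := by
  have := foldA L L.length 0 0 (by omega)
  simpa [get_num_bridge_bonds_py, pairStepA, PySem.Set.len] using this

-- B's enumerate/slice loop is the pair fold over the presorted list
theorem foldB (S : List (List Int)) :
    ∀ (tail : List (List Int)) (s : Nat), S.drop s = tail → ∀ (acc : Int),
    (PySem.List.enumerate tail (s : Int)).foldl
      (fun total ir1 =>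
        (PySem.List.slice S (some (ir1.1 + 1)) none).foldl (fun t r2 => stepB t ir1.2 r2) total) acc
    = pairFoldB tail acc := by
  intro tail
  induction tail with
  | nil => intro s _ acc; simp [PySem.List.enumerate, pairFoldB]
  | cons x xs ih =>
    intro s hdrop acc
    rw [PySem.List.enumerate_cons, List.foldl_cons]
    have hcast : (s : Int) + 1 = ((s + 1 : Nat) : Int) := by push_cast; ring
    have hdrop' : S.drop (s + 1) = xs := by
      rw [← List.tail_drop, hdrop]; rfl
    rw [hcast, ih (s + 1) hdrop' _]
    rw [pairFoldB]
    congr 1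
    rw [PySem.List.slice_from_natCast, hdrop']

theorem portB_eq0 (L : List (List Int)) :
    get_num_bridge_bonds_py_alt L
      = pairFoldB (L.map (fun r => PySem.List.sorted (PySem.Set.ofList r) (fun x => x) false)) 0 := by
  have := foldB (L.map (fun r => PySem.List.sorted (PySem.Set.ofList r) (fun x => x) false))
    (L.map (fun r => PySem.List.sorted (PySem.Set.ofList r) (fun x => x) false)) 0 rfl 0
  simpa [get_num_bridge_bonds_py_alt, stepB] using this

theorem pairFoldB_map (L : List (List Int)) (acc : Int) :
    pairFoldB (L.map (fun r => PySem.List.sorted (PySem.Set.ofList r) (fun x => x) false)) acc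
      = pairFold L acc := by
  induction L generalizing acc with
  | nil => rfl
  | cons r rs ih =>
    rw [List.map_cons, pairFoldB, pairFold, List.foldl_map]
    have hstep : (fun (t : Int) (r2 : List Int) =>
        stepB t (PySem.List.sorted (PySem.Set.ofList r) (fun x => x) false)
          (PySem.List.sorted (PySem.Set.ofList r2) (fun x => x) false))
        = fun t r2 => pairStepA t r r2 := by
      funext t r2
      simp only [stepB, pairStepA, inter_len]
    rw [hstep, ih]

theorem portB_eq (L : List (List Int)) : get_num_bridge_bonds_py_alt L = pairFold L 0 := by
  rw [portB_eq0, pairFoldB_map]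

-- ===== VERDICT (by name: the statement is the Claim_ definition above) =====
theorem get_num_bridge_bonds_py_spec : Claim_equal_get_num_bridge_bonds_py := by
  intro L _
  unfold Spec_get_num_bridge_bonds_py
  rw [portA_eq, portB_eq]
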